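-- pv_equiv track=rewrite | github.com/Xorcist15/Year_1 | python/MATH/exos_tableaux.py | peut_se_deplacer
-- ===== SOURCE A (Python) =====
-- def position_valide(x, y):
--     return 0 <= x < 8 and 0 <= y < 8
--
-- def peut_se_deplacer(x, y, x_dest, y_dest):
--
--     if not position_valide(x_dest, y_dest):
--         return False
--
--     mouvements_possibles = [
--         (x+2, y+1), (x+2, y-1), (x-2, y+1), (x-2, y-1),
--         (x+1, y+2), (x+1, y-2), (x-1, y+2), (x-1, y-2)
--     ]
--
--     for mv_x, mv_y in mouvements_possibles:
--         if mv_x == x_dest and mv_y == y_dest: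
--             return True
--     return False
-- ===== SOURCE B (Python) =====
-- def position_valide(x, y):
--     return 0 <= x < 8 and 0 <= y < 8
--
-- def peut_se_deplacer(x, y, x_dest, y_dest):
--     if not position_valide(x_dest, y_dest):
--         return False
--     dx = abs(x_dest - x)
--     dy = abs(y_dest - y)
--     return (dx == 1 and dy == 2) or (dx == 2 and dy == 1)
-- ===== Notes on version B (the rewrite author's own statement) =====
-- stated objective: simpler
-- what changed: Replaces enumerating the 8 knight destinations and scanning them with a closed-form arithmetic test on |dx|,|dy| (destination-validity guard kept, source unchecked as in A).
import Mathlib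
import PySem

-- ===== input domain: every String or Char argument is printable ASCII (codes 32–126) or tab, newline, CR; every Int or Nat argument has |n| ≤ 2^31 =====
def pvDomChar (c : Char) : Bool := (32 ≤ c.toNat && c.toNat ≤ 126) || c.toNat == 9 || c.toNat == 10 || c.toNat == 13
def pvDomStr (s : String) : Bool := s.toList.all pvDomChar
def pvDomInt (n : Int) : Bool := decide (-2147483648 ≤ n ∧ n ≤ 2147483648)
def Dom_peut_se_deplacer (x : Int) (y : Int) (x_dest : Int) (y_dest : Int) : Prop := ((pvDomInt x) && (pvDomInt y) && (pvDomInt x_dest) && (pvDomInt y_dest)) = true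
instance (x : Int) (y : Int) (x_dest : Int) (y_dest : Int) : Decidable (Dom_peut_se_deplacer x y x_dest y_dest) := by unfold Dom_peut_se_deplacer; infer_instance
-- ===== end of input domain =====

-- B replaces the 8-move enumeration with a closed-form |dx|,|dy| knight-move test (same destination-only validity check as A).


-- ===== PORT A =====
def position_valide (x : Int) (y : Int) : Bool :=
  decide (0 ≤ x ∧ x < 8) && decide (0 ≤ y ∧ y < 8)

def peut_se_deplacer (x : Int) (y : Int) (x_dest : Int) (y_dest : Int) : Bool :=
  if !position_valide x_dest y_dest then false
  else
    let mouvements_possibles : List (Int × Int) :=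
      [(x+2, y+1), (x+2, y-1), (x-2, y+1), (x-2, y-1),
       (x+1, y+2), (x+1, y-2), (x-1, y+2), (x-1, y-2)]
    mouvements_possibles.any (fun mv => mv.1 == x_dest && mv.2 == y_dest)

-- ===== PORT B =====
def peut_se_deplacer_alt (x : Int) (y : Int) (x_dest : Int) (y_dest : Int) : Bool :=
  if !position_valide x_dest y_dest then false
  else
    let dx := (x_dest - x).natAbs
    let dy := (y_dest - y).natAbs
    (dx == 1 && dy == 2) || (dx == 2 && dy == 1)

-- ===== PRECONDITION & SPEC =====
def Spec_peut_se_deplacer (x : Int) (y : Int) (x_dest : Int) (y_dest : Int) (out : Bool) : Prop := out = peut_se_deplacer_alt x y x_dest y_dest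
instance (x : Int) (y : Int) (x_dest : Int) (y_dest : Int) (out : Bool) : Decidable (Spec_peut_se_deplacer x y x_dest y_dest out) := by unfold Spec_peut_se_deplacer; infer_instance

-- ===== CLAIM (what is proved, stated in full; the proofs are below) =====
def Claim_equal_peut_se_deplacer : Prop := ∀ (x : Int) (y : Int) (x_dest : Int) (y_dest : Int), Dom_peut_se_deplacer x y x_dest y_dest → Spec_peut_se_deplacer x y x_dest y_dest (peut_se_deplacer x y x_dest y_dest)

-- ===== LEMMAS AND PROOFS =====

-- ===== VERDICT (by name: the statement is the Claim_ definition above) =====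
theorem peut_se_deplacer_spec : Claim_equal_peut_se_deplacer := by
  intro x y xd yd _
  unfold Spec_peut_se_deplacer peut_se_deplacer peut_se_deplacer_alt position_valide
  simp only [List.any_cons, List.any_nil, Bool.or_false, Bool.not_eq_true',
    Bool.and_eq_false_iff, decide_eq_false_iff_not]
  split
  · rfl
  · rw [Bool.eq_iff_iff]
    simp only [Bool.and_eq_true, Bool.or_eq_true, beq_iff_eq]
    omega
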